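-- pv_equiv track=rewrite | github.com/PARADISSEEKR/azure-cli | src/azure-cli/azure/cli/command_modules/network/zone_file/record_processors.py | _quote_field
-- ===== SOURCE A (Python) =====
-- def _quote_field(data, field):
--     """
--     Quote a field in a list of DNS records.
--     Return the new data records.
--     """
--     if data is None:
--         return None
--
--     # embedded quotes require escaping - but only if not escaped already
--     # note that semi-colons do not need escaping here since we are putting it
--     # inside of a quoted string
--     fieldBuf = ""
--     escape = False
--     for c in data[field]:
--         if c == '"':
--             fieldBuf += '\\"'
--             escape = False
--         elif c == '\\':
--             if escape:
--                 fieldBuf += '\\\\'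
--                 escape = False
--             else:
--                 escape = True
--         else:
--             if escape:
--                 fieldBuf += '\\'
--             fieldBuf += c
--             escape = False
--
--     data[field] = '"%s"' % fieldBuf
--
--     return data
-- ===== SOURCE B (Python) =====
-- def _quote_field(data, field):
--     """
--     Quote a field in a list of DNS records.
--     Return the new data records.
--     """
--     if data is None:
--         return None
--
--     s = data[field]
--     out = []
--     i = 0
--     n = len(s)
--     while i < n:
--         c = s[i]
--         if c == '"':
--             out.append('\\"')
--             i += 1
--         elif c == '\\':
--             if i + 1 < n:
--                 nxt = s[i + 1]
--                 if nxt == '"':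
--                     out.append('\\"')
--                 elif nxt == '\\':
--                     out.append('\\\\')
--                 else:
--                     out.append('\\' + nxt)
--                 i += 2
--             else:
--                 # a lone trailing backslash escapes nothing: drop it
--                 i += 1
--         else:
--             out.append(c)
--             i += 1
--
--     data[field] = '"%s"' % ''.join(out)
--     return data
-- ===== Notes on version B (the rewrite author's own statement) =====
-- stated objective: alternative
-- what changed: Replaced A's deferred-escape boolean-flag fold with an index/lookahead pass that consumes a backslash together with the following character in one step (recursion on two-character patterns in the port).
import Mathlib
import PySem

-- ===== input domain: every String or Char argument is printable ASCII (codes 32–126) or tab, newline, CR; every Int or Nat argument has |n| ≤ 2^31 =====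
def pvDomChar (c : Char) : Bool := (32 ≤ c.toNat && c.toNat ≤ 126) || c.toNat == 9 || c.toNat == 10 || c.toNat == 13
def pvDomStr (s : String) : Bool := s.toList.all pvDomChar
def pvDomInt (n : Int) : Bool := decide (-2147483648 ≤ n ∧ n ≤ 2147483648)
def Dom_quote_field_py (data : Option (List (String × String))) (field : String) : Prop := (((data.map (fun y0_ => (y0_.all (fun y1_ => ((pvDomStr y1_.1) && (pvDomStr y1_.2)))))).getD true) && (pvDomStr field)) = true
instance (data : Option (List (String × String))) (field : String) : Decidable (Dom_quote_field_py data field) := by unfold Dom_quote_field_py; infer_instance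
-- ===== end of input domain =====

-- B replaces the deferred-escape flag loop with a lookahead pass that consumes '\'+next in one step;
-- same cost, different decomposition. Python A mutates data in place; the equivalence is about the returned value.

-- ===== PORT A =====
-- A's loop state: (fieldBuf, escape)
def pvStepA (st : List Char × Bool) (c : Char) : List Char × Bool :=
  if c = '"' then (st.1 ++ ['\\', '"'], false)
  else if c = '\\' then
    if st.2 then (st.1 ++ ['\\', '\\'], false) else (st.1, true)
  else
    ((if st.2 then st.1 ++ ['\\'] else st.1) ++ [c], false)

def quote_field_py (data : Option (List (String × String))) (field : String) : Option (List (String × String)) :=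
  match data with
  | none => none
  | some l =>
    let d := PySem.Dict.mk l
    -- data[field]: KeyError (field absent) is excluded by Pre_; getD "" totalises outside Pre_
    let s := ((d.get? field).getD "").toList
    let st := s.foldl pvStepA ([], false)
    some ((d.insert field (String.ofList ('"' :: st.1 ++ ['"']))).items)

-- ===== PORT B =====
-- Source B's while loop with lookahead, as recursion on one- or two-character patterns
def pvEscB : List Char → List Char
  | [] => []
  | '"' :: rest => '\\' :: '"' :: pvEscB rest
  | '\\' :: c2 :: rest =>
      if c2 = '"' then '\\' :: '"' :: pvEscB rest
      else if c2 = '\\' then '\\' :: '\\' :: pvEscB rest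
      else '\\' :: c2 :: pvEscB rest
  | ['\\'] => []
  | c :: rest => c :: pvEscB rest

def quote_field_py_alt (data : Option (List (String × String))) (field : String) : Option (List (String × String)) :=
  match data with
  | none => none
  | some l =>
    let d := PySem.Dict.mk l
    let s := ((d.get? field).getD "").toList
    some ((d.insert field (String.ofList ('"' :: pvEscB s ++ ['"']))).items)

-- ===== PRECONDITION & SPEC =====
-- Pre_ excludes only the KeyError case: a non-None data whose dict has no key `field` (Python A raises there).
def Pre_quote_field_py (data : Option (List (String × String))) (field : String) : Prop :=
  (data.map (fun l => l.any (fun kv => kv.1 == field))).getD true = true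
instance (data : Option (List (String × String))) (field : String) : Decidable (Pre_quote_field_py data field) := by unfold Pre_quote_field_py; infer_instance

def pvWitness_quote_field_py : (Option (List (String × String))) × String :=
  (some [("f", "a\\\"b")], "f")

def Spec_quote_field_py (data : Option (List (String × String))) (field : String) (out : Option (List (String × String))) : Prop := out = quote_field_py_alt data field
instance (data : Option (List (String × String))) (field : String) (out : Option (List (String × String))) : Decidable (Spec_quote_field_py data field out) := by unfold Spec_quote_field_py; infer_instance

-- ===== CLAIM (what is proved, stated in full; the proofs are below) =====
def Claim_equal_quote_field_py : Prop := ∀ (data : Option (List (String × String))) (field : String), Dom_quote_field_py data field → Pre_quote_field_py data field → Spec_quote_field_py data field (quote_field_py data field)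

-- ===== LEMMAS AND PROOFS =====

-- A's flag-fold equals B's lookahead recursion; the `true` state is a pending backslash.
theorem pvFoldA_eq_escB (cs : List Char) : ∀ (buf : List Char),
    (cs.foldl pvStepA (buf, false)).1 = buf ++ pvEscB cs ∧
    (cs.foldl pvStepA (buf, true)).1 = buf ++ pvEscB ('\\' :: cs) := by
  induction cs with
  | nil => intro buf; simp [pvEscB]
  | cons c rest ih =>
    intro buf
    by_cases hq : c = '"'
    · subst hq
      constructor
      · simpa [pvStepA, pvEscB] using (ih (buf ++ ['\\', '"'])).1
      · simpa [pvStepA, pvEscB] using (ih (buf ++ ['\\', '"'])).1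
    · by_cases hb : c = '\\'
      · subst hb
        constructor
        · simpa [pvStepA, pvEscB] using (ih buf).2
        · simpa [pvStepA, pvEscB] using (ih (buf ++ ['\\', '\\'])).1
      · constructor
        · have h1 := (ih (buf ++ [c])).1
          simp only [List.foldl_cons, pvStepA, if_neg hq, if_neg hb, Bool.false_eq_true,
            if_false] at h1 ⊢
          rw [h1]
          cases rest with
          | nil => simp [pvEscB, hb]
          | cons d ds => simp [pvEscB, hb]
        · have h1 := (ih (buf ++ ['\\', c])).1
          simp only [List.foldl_cons, pvStepA, if_neg hq, if_neg hb, if_true] at h1 ⊢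
          rw [List.append_assoc] at h1
          simpa [pvEscB, hq, hb] using h1

-- ===== VERDICT (by name: the statement is the Claim_ definition above) =====
theorem quote_field_py_spec : Claim_equal_quote_field_py := by
  intro data field _ _
  unfold Spec_quote_field_py quote_field_py quote_field_py_alt
  cases data with
  | none => rfl
  | some l =>
    simp only
    rw [(pvFoldA_eq_escB (((PySem.Dict.mk l).get? field).getD "").toList []).1]
    rfl
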